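-- pv_equiv track=rewrite | github.com/postapi007/AiAnswerDesk | admin/service.py | _column_index_from_ref
-- ===== SOURCE A (Python) =====
-- def _column_index_from_ref(cell_ref: str) -> int:
--     letters = "".join(ch for ch in cell_ref if ch.isalpha()).upper()
--     if not letters:
--         return 0
--     index = 0
--     for ch in letters:
--         index = index * 26 + (ord(ch) - ord("A") + 1)
--     return max(index - 1, 0)
-- ===== SOURCE B (Python) =====
-- def _column_index_from_ref(cell_ref: str) -> int:
--     value = 0
--     power = 1
--     for ch in reversed(cell_ref):
--         if ch.isalpha():
--             value += (ord(ch.upper()) - 64) * power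
--             power *= 26
--     return max(value - 1, 0)
-- ===== Notes on version B (the rewrite author's own statement) =====
-- stated objective: alternative
-- what changed: Replaces the filter-join-upper preprocessing plus left-to-right Horner accumulation with a single reversed-order pass that filters inline and accumulates a direct weighted sum (value += digit * power; power *= 26).
import Mathlib
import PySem

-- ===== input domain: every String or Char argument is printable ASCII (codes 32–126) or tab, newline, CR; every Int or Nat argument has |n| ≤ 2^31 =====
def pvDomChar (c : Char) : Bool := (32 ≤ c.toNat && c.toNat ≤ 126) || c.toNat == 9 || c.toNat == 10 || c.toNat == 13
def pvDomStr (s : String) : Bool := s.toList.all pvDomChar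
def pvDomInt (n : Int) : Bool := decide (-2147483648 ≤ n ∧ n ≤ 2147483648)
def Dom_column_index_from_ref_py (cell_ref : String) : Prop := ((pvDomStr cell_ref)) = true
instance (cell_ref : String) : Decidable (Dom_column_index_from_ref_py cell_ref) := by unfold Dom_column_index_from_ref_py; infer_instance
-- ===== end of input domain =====

-- B replaces A's filter/join/upper + left-to-right Horner loop with one reversed-order
-- pass that filters inline and accumulates a weighted sum with an explicit power of 26
-- (alternative decomposition, same cost).


-- ===== PORT A =====
def column_index_from_ref_py (cell_ref : String) : Int :=
  let letters : List Char := PySem.Chars.upper (cell_ref.toList.filter PySem.Chars.isalpha)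
  if letters = [] then 0
  else
    let index := letters.foldl (fun i ch => i * 26 + ((ch.toNat : Int) - 65 + 1)) 0
    max (index - 1) 0

-- ===== PORT B =====
def pvAltStep (st : Int × Int) (ch : Char) : Int × Int :=
  if PySem.Chars.isalpha ch then
    (st.1 + (((PySem.Chars.upperChar ch).toNat : Int) - 64) * st.2, st.2 * 26)
  else st

def column_index_from_ref_py_alt (cell_ref : String) : Int :=
  let st := cell_ref.toList.reverse.foldl pvAltStep (0, 1)
  max (st.1 - 1) 0

-- ===== PRECONDITION & SPEC =====
def Spec_column_index_from_ref_py (cell_ref : String) (out : Int) : Prop := out = column_index_from_ref_py_alt cell_ref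
instance (cell_ref : String) (out : Int) : Decidable (Spec_column_index_from_ref_py cell_ref out) := by unfold Spec_column_index_from_ref_py; infer_instance

-- ===== CLAIM (what is proved, stated in full; the proofs are below) =====
def Claim_equal_column_index_from_ref_py : Prop := ∀ (cell_ref : String), Dom_column_index_from_ref_py cell_ref → Spec_column_index_from_ref_py cell_ref (column_index_from_ref_py cell_ref)

-- ===== LEMMAS AND PROOFS =====

-- A's Horner value of a list of (not yet uppercased) letters.
def pvHorner (l : List Char) : Int :=
  l.foldl (fun i c => i * 26 + (((PySem.Chars.upperChar c).toNat : Int) - 64)) 0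

theorem pvHorner_append_singleton (l : List Char) (c : Char) :
    pvHorner (l ++ [c]) = pvHorner l * 26 + (((PySem.Chars.upperChar c).toNat : Int) - 64) := by
  simp [pvHorner, List.foldl_append]

theorem pvAlt_fold (l : List Char) (v p : Int) :
    (l.foldl pvAltStep (v, p)).1 = v + p * pvHorner ((l.filter PySem.Chars.isalpha).reverse) := by
  induction l generalizing v p with
  | nil => simp [pvHorner]
  | cons c t ih =>
    by_cases h : PySem.Chars.isalpha c = true
    · simp only [List.foldl_cons, pvAltStep, h, if_pos, List.filter_cons_of_pos h,
        List.reverse_cons, pvHorner_append_singleton, ih]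
      ring
    · simp [List.foldl_cons, pvAltStep, h, List.filter_cons_of_neg h, ih]

theorem column_index_from_ref_py_eq (cell_ref : String) :
    column_index_from_ref_py cell_ref = column_index_from_ref_py_alt cell_ref := by
  unfold column_index_from_ref_py column_index_from_ref_py_alt
  have hb : (cell_ref.toList.reverse.foldl pvAltStep (0, 1)).1
      = pvHorner (cell_ref.toList.filter PySem.Chars.isalpha) := by
    rw [pvAlt_fold]
    simp [List.filter_reverse]
  have hA : ((cell_ref.toList.filter PySem.Chars.isalpha).map PySem.Chars.upperChar).foldl
      (fun i ch => i * 26 + ((ch.toNat : Int) - 65 + 1)) 0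
      = pvHorner (cell_ref.toList.filter PySem.Chars.isalpha) := by
    rw [List.foldl_map]
    unfold pvHorner
    congr 1
    funext i c
    ring
  by_cases he : cell_ref.toList.filter PySem.Chars.isalpha = []
  · simp only [PySem.Chars.upper, he, List.map_nil, if_pos rfl, hb, pvHorner, List.foldl_nil]
    decide
  · simp only [PySem.Chars.upper, hb, hA]
    rw [if_neg (by simpa using he)]

-- ===== VERDICT (by name: the statement is the Claim_ definition above) =====
theorem column_index_from_ref_py_spec : Claim_equal_column_index_from_ref_py := by
  intro cell_ref _
  unfold Spec_column_index_from_ref_py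
  exact column_index_from_ref_py_eq cell_ref
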